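-- pv_equiv track=rewrite | github.com/yubinbai/pcuva-problems | UVa 11239 - Open Source/main.py | solve
-- ===== SOURCE A (Python) =====
-- from itertools import combinations
--
-- def solve(par):
--     projects = par
--     purge = set()
--     N = len(projects)
--     for p1,p2 in combinations(projects, 2):
--         if p1 != p2:
--             intersection = projects[p1] & projects[p2]
--             projects[p1] -= intersection
--             projects[p2] -= intersection
--
--     results = []
--     for p in projects:
--         results.append([-1 * len(projects[p]), p])
--     results.sort()
--
--     s = []
--     for row in results:
--         if row[0] != 0:
--             s.append('%s %d' % (row[1], -1 * row[0]))
--     return '\n'.join(s)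
-- ===== SOURCE B (Python) =====
-- def solve(par):
--     count = {}
--     last = {}
--     for p, devs in par.items():
--         for d in devs:
--             count[d] = count.get(d, 0) + 1
--             last[d] = p
--     tally = {}
--     for d, c in count.items():
--         if c % 2 == 1:
--             q = last[d]
--             tally[q] = tally.get(q, 0) + 1
--     rows = sorted((-c, p) for p, c in tally.items())
--     return '\n'.join('%s %d' % (p, -c) for c, p in rows)
-- ===== Notes on version B (the rewrite author's own statement) =====
-- stated objective: faster
-- what changed: A cancels shared developers over all O(N^2) project pairs with set intersections/differences; B makes one pass over the input recording, per developer, how many projects contain them and the last such project, then tallies developers with an odd project count into their last project - same output (sorted, zero counts dropped), no pairwise set algebra.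
import Mathlib
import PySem

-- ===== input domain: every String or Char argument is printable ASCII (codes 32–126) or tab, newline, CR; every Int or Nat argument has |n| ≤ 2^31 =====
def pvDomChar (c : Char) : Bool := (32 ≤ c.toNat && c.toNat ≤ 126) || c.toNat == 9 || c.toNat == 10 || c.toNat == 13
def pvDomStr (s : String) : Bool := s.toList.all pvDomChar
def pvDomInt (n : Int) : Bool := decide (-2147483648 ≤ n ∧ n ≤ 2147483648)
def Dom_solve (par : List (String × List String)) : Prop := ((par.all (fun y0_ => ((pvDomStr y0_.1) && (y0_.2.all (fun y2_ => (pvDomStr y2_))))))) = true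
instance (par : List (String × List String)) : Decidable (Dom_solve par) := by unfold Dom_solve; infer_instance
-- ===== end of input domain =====

-- B replaces A's O(N^2)-project-pair set cancellation by a single pass tallying, per
-- developer, the number of projects containing them (parity) and the last such project.
-- A mutates the sets stored in its dict argument in place; B does not: the equivalence
-- proved here is about the return value only.

-- ===== PORT A =====
-- itertools.combinations(keys, 2), in Python's pair order
def pyCombos : List String → List (String × String)
  | [] => []
  | x :: xs => xs.map (fun y => (x, y)) ++ pyCombos xs

def solve (par : List (String × List String)) : String :=
  let projects : PySem.Dict String (PySem.Set String) :=
    PySem.Dict.ofList (par.map (fun pr => (pr.1, PySem.Set.ofList pr.2)))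
  let projects := (pyCombos projects.keys).foldl (fun d pq =>
    if pq.1 ≠ pq.2 then
      let inter := PySem.Set.inter (d.getD pq.1 []) (d.getD pq.2 [])
      let d := d.insert pq.1 (PySem.Set.diff (d.getD pq.1 []) inter)
      let d := d.insert pq.2 (PySem.Set.diff (d.getD pq.2 []) inter)
      d
    else d) projects
  let results := projects.keys.map (fun p => ((-1 : Int) * PySem.List.len (projects.getD p []), p))
  -- Python list.sort() on [int, str] pairs compares lexicographically
  let results := PySem.List.sorted results (fun r => toLex (r.1, r.2.toList))
  let s := results.foldl (fun s r => if r.1 ≠ 0 then s ++ [r.2 ++ " " ++ PySem.Int.toStr (-1 * r.1)] else s) ([] : List String)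
  PySem.Str.join "\n" s

-- ===== PORT B =====
def solve_alt (par : List (String × List String)) : String :=
  let cl := par.foldl (fun cl pr =>
      pr.2.foldl (fun cl2 d =>
        (cl2.1.insert d (cl2.1.getD d 0 + 1), cl2.2.insert d pr.1)) cl)
    ((PySem.Dict.empty : PySem.Dict String Int), (PySem.Dict.empty : PySem.Dict String String))
  let count := cl.1
  let last := cl.2
  let tally := count.items.foldl (fun t dc =>
      if PySem.Int.mod dc.2 2 == 1 then
        let q := last.getD dc.1 ""
        t.insert q (t.getD q 0 + 1)
      else t) (PySem.Dict.empty : PySem.Dict String Int)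
  let rows := PySem.List.sorted (tally.items.map (fun pc => (-pc.2, pc.1))) (fun r => toLex (r.1, r.2.toList))
  PySem.Str.join "\n" (rows.map (fun r => r.2 ++ " " ++ PySem.Int.toStr (-r.1)))

-- ===== PRECONDITION & SPEC =====
-- Pre_ is the representation invariant of the Python argument type dict[str, set[str]]:
-- dict keys pairwise distinct and every developer list duplicate-free (a list with
-- duplicates does not encode any Python dict/set input, so A never receives one).
def Pre_solve (par : List (String × List String)) : Prop :=
  (par.map (fun pr => pr.1)).Nodup ∧ ∀ pr ∈ par, pr.2.Nodup
instance (par : List (String × List String)) : Decidable (Pre_solve par) := by unfold Pre_solve; infer_instance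

def pvWitness_solve : (List (String × List String)) := [("p", ["a", "b"]), ("q", ["b"])]

def Spec_solve (par : List (String × List String)) (out : String) : Prop := out = solve_alt par
instance (par : List (String × List String)) (out : String) : Decidable (Spec_solve par out) := by unfold Spec_solve; infer_instance

-- ===== CLAIM (what is proved, stated in full; the proofs are below) =====
def Claim_equal_solve : Prop := ∀ (par : List (String × List String)), Dom_solve par → Pre_solve par → Spec_solve par (solve par)

-- ===== LEMMAS AND PROOFS =====

def pairStep (μ : String → Bool) (pq : String × String) : String → Bool :=
  fun r => if r = pq.1 then (μ pq.1 && !μ pq.2) else if r = pq.2 then (μ pq.2 && !μ pq.1) else μ r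

def runPairs (μ : String → Bool) (L : List (String × String)) : String → Bool :=
  L.foldl pairStep μ

theorem mem_pyCombos {pq : String × String} {ks : List String} (h : pq ∈ pyCombos ks) :
    pq.1 ∈ ks ∧ pq.2 ∈ ks := by
  induction ks with
  | nil => simp [pyCombos] at h
  | cons x xs ih =>
    simp only [pyCombos, List.mem_append, List.mem_map] at h
    rcases h with ⟨y, hy, rfl⟩ | h
    · simp [hy]
    · have := ih h; simp [this.1, this.2]

theorem pairStep_fst_false {μ : String → Bool} {pq : String × String} (h : μ pq.1 = false) :
    pairStep μ pq = μ := by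
  funext r
  simp only [pairStep]
  split_ifs with h1 h2
  · subst h1; simp [h]
  · subst h2; simp [h]
  · rfl

theorem pairStep_snd_false {μ : String → Bool} {pq : String × String} (h : μ pq.2 = false) :
    pairStep μ pq = μ := by
  funext r
  simp only [pairStep]
  split_ifs with h1 h2
  · subst h1; simp [h]
  · subst h2; simp [h]
  · rfl

theorem runPairs_untouched {μ : String → Bool} {L : List (String × String)} {r : String}
    (h : ∀ pq ∈ L, r ≠ pq.1 ∧ r ≠ pq.2) : runPairs μ L r = μ r := by
  induction L generalizing μ with
  | nil => rfl
  | cons pq L ih =>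
    have h1 := h pq (by simp)
    have : pairStep μ pq r = μ r := by
      simp only [pairStep, if_neg h1.1, if_neg h1.2]
    calc runPairs μ (pq :: L) r = runPairs (pairStep μ pq) L r := rfl
      _ = pairStep μ pq r := ih (fun q hq => h q (by simp [hq]))
      _ = μ r := this

theorem phase1_false {μ : String → Bool} {x : String} {xs : List String} (h : μ x = false) :
    runPairs μ (xs.map (fun y => (x, y))) = μ := by
  induction xs with
  | nil => rfl
  | cons y ys ih =>
    show runPairs (pairStep μ (x, y)) (ys.map fun y => (x, y)) = μ
    rw [pairStep_fst_false h, ih]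

theorem phase1_none {μ : String → Bool} {x : String} {xs : List String}
    (h : ∀ y ∈ xs, μ y = false) :
    runPairs μ (xs.map (fun y => (x, y))) = μ := by
  induction xs with
  | nil => rfl
  | cons y ys ih =>
    show runPairs (pairStep μ (x, y)) (ys.map fun y => (x, y)) = μ
    rw [pairStep_snd_false (h y (by simp)), ih (fun z hz => h z (by simp [hz]))]

theorem phase1_hit {μ : String → Bool} {x y₀ : String} {as bs : List String}
    (hx : μ x = true) (hxn : x ∉ as ++ y₀ :: bs) (has : ∀ a ∈ as, μ a = false)
    (hy : μ y₀ = true) :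
    runPairs μ ((as ++ y₀ :: bs).map (fun y => (x, y))) =
      fun r => if r = x then false else if r = y₀ then false else μ r := by
  induction as generalizing μ with
  | nil =>
    simp only [List.nil_append, List.map_cons]
    show runPairs (pairStep μ (x, y₀)) (bs.map fun y => (x, y)) = _
    have hxy : x ≠ y₀ := by intro h; apply hxn; simp [h]
    have hstep : pairStep μ (x, y₀) = fun r => if r = x then false else if r = y₀ then false else μ r := by
      funext r
      simp only [pairStep]
      split_ifs with h1 h2
      · simp [hx, hy]
      · simp [hx, hy]
      · rfl
    rw [hstep, phase1_false (by simp)]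
  | cons a as ih =>
    simp only [List.cons_append, List.map_cons]
    show runPairs (pairStep μ (x, a)) ((as ++ y₀ :: bs).map fun y => (x, y)) = _
    rw [pairStep_snd_false (has a (by simp))]
    exact ih hx (by intro h; exact hxn (by simp at h ⊢; tauto)) (fun z hz => has z (by simp [hz])) hy

theorem runPairs_combos {ks : List String} (hnd : ks.Nodup) (μ : String → Bool)
    {r : String} (hr : r ∈ ks) :
    runPairs μ (pyCombos ks) r =
      (decide ((ks.filter μ).length % 2 = 1) && decide ((ks.filter μ).getLast? = some r)) := by
  induction ks generalizing μ with
  | nil => simp at hr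
  | cons x xs ih =>
    have hxn : x ∉ xs := (List.nodup_cons.mp hnd).1
    have hndx : xs.Nodup := (List.nodup_cons.mp hnd).2
    have hsplit : runPairs μ (pyCombos (x :: xs)) r
        = runPairs (runPairs μ (xs.map fun y => (x, y))) (pyCombos xs) r := by
      simp only [pyCombos, runPairs, List.foldl_append]
    by_cases hx : μ x = true
    · rcases hfe : xs.filter μ with _ | ⟨y₀, rest⟩
      · -- no later live project
        have hall : ∀ y ∈ xs, μ y = false := by
          intro y hy
          by_contra hc
          have : y ∈ xs.filter μ := List.mem_filter.mpr ⟨hy, by simpa using hc⟩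
          simp [hfe] at this
        rw [hsplit, phase1_none hall]
        have hLf : (x :: xs).filter μ = [x] := by
          simp [hx, hfe]
        rcases List.mem_cons.mp hr with rfl | hrx
        · rw [runPairs_untouched (by
            intro pq hpq
            have := mem_pyCombos hpq
            exact ⟨fun h => hxn (h ▸ this.1), fun h => hxn (h ▸ this.2)⟩)]
          simp [hLf, hx]
        · rw [ih hndx μ hrx]
          have hrnex : r ≠ x := fun h => hxn (h ▸ hrx)
          simp [hLf, hfe, hrnex, eq_comm]
      · -- y₀ is the first later live project
        obtain ⟨as, bs, hxs, has, -, hbs⟩ := List.filter_eq_cons_iff.mp hfe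
        have hy0 : μ y₀ = true := by
          have : y₀ ∈ xs.filter μ := by simp [hfe]
          exact (List.mem_filter.mp this).2
        subst hxs
        have hμ1 := phase1_hit hx hxn (fun a ha => by simpa using has a ha) hy0
        rw [hsplit, hμ1]
        set μ₁ : String → Bool := fun r => if r = x then false else if r = y₀ then false else μ r with hμ₁
        have hy0xs : y₀ ∈ as ++ y₀ :: bs := by simp
        have hfil1 : (as ++ y₀ :: bs).filter μ₁ = rest := by
          have h1 : (as ++ y₀ :: bs).filter μ₁ = (as ++ y₀ :: bs).filter (fun z => decide (z ≠ y₀) && μ z) := by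
            apply List.filter_congr
            intro z hz
            have hzx : z ≠ x := fun h => hxn (h ▸ hz)
            simp only [hμ₁, if_neg hzx]
            by_cases hzy : z = y₀ <;> simp [hzy]
          rw [h1, ← List.filter_filter, hfe]
          have hndf : ((as ++ y₀ :: bs).filter μ).Nodup := hndx.filter _
          rw [hfe] at hndf
          have hy0r : y₀ ∉ rest := (List.nodup_cons.mp hndf).1
          simp only [List.filter_cons]
          simp only [ne_eq, not_true_eq_false, decide_false]
          simp only [Bool.false_eq_true, if_false]
          exact List.filter_eq_self.mpr (fun a ha => by
            simp only [decide_eq_true_eq]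
            exact fun h => hy0r (h ▸ ha))
        have hL : (x :: (as ++ y₀ :: bs)).filter μ = x :: y₀ :: rest := by
          simp [hx, hfe]
        rcases List.mem_cons.mp hr with rfl | hrx
        · rw [runPairs_untouched (by
            intro pq hpq
            have := mem_pyCombos hpq
            exact ⟨fun h => hxn (h ▸ this.1), fun h => hxn (h ▸ this.2)⟩)]
          have : μ₁ r = false := by simp [hμ₁]
          rw [this]
          have hlast : ((r :: (as ++ y₀ :: bs)).filter μ).getLast? ≠ some r := by
            rw [hL]
            intro hcon
            have : (y₀ :: rest).getLast? = some r := by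
              rwa [List.getLast?_cons_cons] at hcon
            have hmem : r ∈ y₀ :: rest := List.mem_of_getLast? this
            have : r ∈ (as ++ y₀ :: bs).filter μ := by rw [hfe]; exact hmem
            exact hxn (List.mem_of_mem_filter this)
          rw [decide_eq_false hlast, Bool.and_false]
        · rw [ih hndx μ₁ hrx, hL, hfil1]
          rcases rest with _ | ⟨b, t⟩
          · simp
          · have e1 : (x :: y₀ :: b :: t).getLast? = (b :: t).getLast? := by
              rw [List.getLast?_cons_cons, List.getLast?_cons_cons]
            have e2 : ((x :: y₀ :: b :: t).length % 2 = 1) ↔ ((b :: t).length % 2 = 1) := by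
              simp only [List.length_cons]; omega
            rw [e1, decide_eq_decide.mpr e2]
    · -- μ x = false
      have hx' : μ x = false := by simpa using hx
      rw [hsplit, phase1_false hx']
      have hLf : (x :: xs).filter μ = xs.filter μ := by simp [hx']
      rcases List.mem_cons.mp hr with rfl | hrx
      · rw [runPairs_untouched (by
          intro pq hpq
          have := mem_pyCombos hpq
          exact ⟨fun h => hxn (h ▸ this.1), fun h => hxn (h ▸ this.2)⟩)]
        rw [hx', hLf]
        have : (xs.filter μ).getLast? ≠ some r := by
          intro hcon
          have : r ∈ xs.filter μ := List.mem_of_getLast? hcon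
          exact hxn (List.mem_of_mem_filter this)
        rw [decide_eq_false this, Bool.and_false]
      · rw [ih hndx μ hrx, hLf]

-- ========== A-side dict machinery ==========

def vOf (par : List (String × List String)) (p : String) : List String :=
  ((par.find? (fun pr => pr.1 == p)).map (fun pr => pr.2)).getD []

def entriesOf (par : List (String × List String)) (Φ : String → String → Bool) :
    List (String × PySem.Set String) :=
  par.map (fun pr => (pr.1, (PySem.Set.ofList pr.2).filter (fun d => Φ pr.1 d)))

def GoodPhi (par : List (String × List String)) (Φ : String → String → Bool) : Prop :=
  ∀ p d, Φ p d = true → (PySem.Set.ofList (vOf par p)).contains d = true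

theorem keyInj {par : List (String × List String)} (hk : (par.map (fun pr => pr.1)).Nodup)
    {pr pr' : String × List String} (h1 : pr ∈ par) (h2 : pr' ∈ par) (he : pr.1 = pr'.1) :
    pr = pr' := by
  induction par with
  | nil => simp at h1
  | cons a l ih =>
    simp only [List.map_cons, List.nodup_cons] at hk
    rcases List.mem_cons.mp h1 with rfl | h1' <;> rcases List.mem_cons.mp h2 with rfl | h2'
    · rfl
    · exact absurd (show pr.1 ∈ l.map (fun pr => pr.1) by
        rw [he]; exact List.mem_map_of_mem h2') hk.1
    · exact absurd (show pr'.1 ∈ l.map (fun pr => pr.1) by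
        rw [← he]; exact List.mem_map_of_mem h1') hk.1
    · exact ih hk.2 h1' h2'

theorem vOf_eq {par : List (String × List String)} (hk : (par.map (fun pr => pr.1)).Nodup)
    {pr : String × List String} (h : pr ∈ par) : vOf par pr.1 = pr.2 := by
  induction par with
  | nil => simp at h
  | cons a l ih =>
    simp only [List.map_cons, List.nodup_cons] at hk
    rcases List.mem_cons.mp h with rfl | h'
    · simp [vOf, List.find?_cons_of_pos]
    · have hne : ¬((a.1 : String) == pr.1) = true := by
        simp only [beq_iff_eq]
        intro hcon
        exact hk.1 (show a.1 ∈ l.map (fun pr => pr.1) by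
          rw [hcon]; exact List.mem_map_of_mem h')
      have hrec := ih hk.2 h'
      unfold vOf at hrec ⊢
      rw [List.find?_cons_of_neg (by simpa using hne)]
      exact hrec

theorem getD_entries {par : List (String × List String)} (hk : (par.map (fun pr => pr.1)).Nodup)
    {pr : String × List String} (h : pr ∈ par) (Φ : String → String → Bool) :
    (PySem.Dict.mk (entriesOf par Φ) : PySem.Dict String (PySem.Set String)).getD pr.1 []
      = (PySem.Set.ofList pr.2).filter (fun d => Φ pr.1 d) := by
  induction par with
  | nil => simp at h
  | cons a l ih =>
    simp only [List.map_cons, List.nodup_cons] at hk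
    rcases List.mem_cons.mp h with rfl | h'
    · simp [PySem.Dict.getD, PySem.Dict.get?, entriesOf, List.find?_cons_of_pos]
    · have hne : ¬((a.1 : String) == pr.1) = true := by
        simp only [beq_iff_eq]
        intro hcon
        exact hk.1 (show a.1 ∈ l.map (fun pr => pr.1) by
          rw [hcon]; exact List.mem_map_of_mem h')
      have hrec := ih hk.2 h'
      simp only [PySem.Dict.getD, PySem.Dict.get?, entriesOf, List.map_cons] at hrec ⊢
      rw [List.find?_cons_of_neg (by simpa using hne)]
      exact hrec

theorem contains_entries {par : List (String × List String)}
    {pr : String × List String} (h : pr ∈ par) (Φ : String → String → Bool) :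
    (PySem.Dict.mk (entriesOf par Φ) : PySem.Dict String (PySem.Set String)).contains pr.1 = true := by
  simp only [PySem.Dict.contains, entriesOf, List.any_eq_true]
  exact ⟨(pr.1, (PySem.Set.ofList pr.2).filter (fun d => Φ pr.1 d)),
    List.mem_map_of_mem h, by simp⟩

theorem entries_congr {par : List (String × List String)} {Φ Ψ : String → String → Bool}
    (h : ∀ pr ∈ par, ∀ d, Φ pr.1 d = Ψ pr.1 d) : entriesOf par Φ = entriesOf par Ψ := by
  unfold entriesOf
  apply List.map_congr_left
  intro pr hpr
  congr 1
  apply List.filter_congr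
  intro d _
  exact h pr hpr d

theorem insert_entries {par : List (String × List String)} (hk : (par.map (fun pr => pr.1)).Nodup)
    {pr0 : String × List String} (h0 : pr0 ∈ par) {Φ Ψ : String → String → Bool}
    (hagree : ∀ pr ∈ par, pr.1 ≠ pr0.1 → ∀ d, Φ pr.1 d = Ψ pr.1 d)
    {v : PySem.Set String}
    (hval : v = (PySem.Set.ofList pr0.2).filter (fun d => Ψ pr0.1 d)) :
    (PySem.Dict.mk (entriesOf par Φ) : PySem.Dict String (PySem.Set String)).insert pr0.1 v
      = PySem.Dict.mk (entriesOf par Ψ) := by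
  rw [PySem.Dict.insert, if_pos (contains_entries h0 Φ)]
  congr 1
  show (entriesOf par Φ).map _ = entriesOf par Ψ
  unfold entriesOf
  rw [List.map_map]
  apply List.map_congr_left
  intro pr hpr
  by_cases he : pr.1 = pr0.1
  · have : pr = pr0 := keyInj hk hpr h0 he
    subst this
    simp [hval]
  · have : ¬((pr.1 : String) == pr0.1) = true := by simpa using he
    simp only [Function.comp_apply, this]
    simp only [Bool.false_eq_true, if_false]
    congr 1
    apply List.filter_congr
    intro d _
    exact hagree pr hpr he d

def stepA (d : PySem.Dict String (PySem.Set String)) (pq : String × String) :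
    PySem.Dict String (PySem.Set String) :=
  if pq.1 ≠ pq.2 then
    let inter := PySem.Set.inter (d.getD pq.1 []) (d.getD pq.2 [])
    let d := d.insert pq.1 (PySem.Set.diff (d.getD pq.1 []) inter)
    let d := d.insert pq.2 (PySem.Set.diff (d.getD pq.2 []) inter)
    d
  else d

theorem good_pairStep {par : List (String × List String)} {Φ : String → String → Bool}
    (hG : GoodPhi par Φ) (pq : String × String) :
    GoodPhi par (fun r d => pairStep (fun s => Φ s d) pq r) := by
  intro p d h
  simp only [pairStep] at h
  split_ifs at h with h1 h2
  · subst h1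
    exact hG _ _ (Bool.and_elim_left h)
  · subst h2
    exact hG _ _ (Bool.and_elim_left h)
  · exact hG _ _ h

theorem contains_filter {l : List String} {p : String → Bool} {d : String} :
    (l.filter p).contains d = (l.contains d && p d) := by
  simp only [List.contains_eq_mem, List.mem_filter]
  by_cases h1 : d ∈ l <;> by_cases h2 : p d = true <;> simp [h1, h2]

theorem stepA_entries {par : List (String × List String)} (hk : (par.map (fun pr => pr.1)).Nodup)
    {pr_p pr_q : String × List String} (hp : pr_p ∈ par) (hq : pr_q ∈ par)
    (hne : pr_p.1 ≠ pr_q.1) (Φ : String → String → Bool) (hG : GoodPhi par Φ) :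
    stepA (PySem.Dict.mk (entriesOf par Φ)) (pr_p.1, pr_q.1)
      = PySem.Dict.mk (entriesOf par (fun r d => pairStep (fun s => Φ s d) (pr_p.1, pr_q.1) r)) := by
  have memp : ∀ d, Φ pr_p.1 d = true → (PySem.Set.ofList pr_p.2).contains d = true := by
    intro d h
    have := hG pr_p.1 d h
    rwa [vOf_eq hk hp] at this
  have memq : ∀ d, Φ pr_q.1 d = true → (PySem.Set.ofList pr_q.2).contains d = true := by
    intro d h
    have := hG pr_q.1 d h
    rwa [vOf_eq hk hq] at this
  unfold stepA
  rw [if_pos (show (pr_p.1, pr_q.1).1 ≠ (pr_p.1, pr_q.1).2 from hne)]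
  dsimp only
  rw [getD_entries hk hp Φ, getD_entries hk hq Φ]
  set Fp := (PySem.Set.ofList pr_p.2).filter (fun d => Φ pr_p.1 d) with hFp
  set Fq := (PySem.Set.ofList pr_q.2).filter (fun d => Φ pr_q.1 d) with hFq
  set I := PySem.Set.inter Fp Fq with hI
  have hIcont : ∀ d, I.contains d = (Φ pr_p.1 d && Φ pr_q.1 d) := by
    intro d
    rw [hI, PySem.Set.inter, hFp, hFq]
    simp only [PySem.Set.contains]
    rw [contains_filter, contains_filter, contains_filter]
    cases hfp : Φ pr_p.1 d
    · simp
    · cases hfq : Φ pr_q.1 d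
      · simp
      · have h1 := memp d hfp
        have h2 := memq d hfq
        simp only [PySem.Set.contains, List.contains_eq_mem, decide_eq_true_eq,
          PySem.Set.mem_ofList] at h1 h2
        simp [h1, h2]
  have hv1 : PySem.Set.diff Fp I = (PySem.Set.ofList pr_p.2).filter
      (fun d => Φ pr_p.1 d && !Φ pr_q.1 d) := by
    rw [PySem.Set.diff, hFp, List.filter_filter]
    apply List.filter_congr
    intro d _
    rw [hIcont d]
    cases hfp : Φ pr_p.1 d <;> cases hfq : Φ pr_q.1 d <;> simp
  set Ψ₁ : String → String → Bool :=
    fun r d => if r = pr_p.1 then Φ pr_p.1 d && !Φ pr_q.1 d else Φ r d with hΨ₁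
  have hIns1 : (PySem.Dict.mk (entriesOf par Φ) :
      PySem.Dict String (PySem.Set String)).insert pr_p.1 (PySem.Set.diff Fp I)
      = PySem.Dict.mk (entriesOf par Ψ₁) := by
    apply insert_entries hk hp
    · intro pr _ hne' d
      rw [hΨ₁]
      simp [if_neg hne']
    · rw [hv1, hΨ₁]
      apply List.filter_congr
      intro d _
      simp
  rw [hIns1]
  have hgq1 : (PySem.Dict.mk (entriesOf par Ψ₁) :
      PySem.Dict String (PySem.Set String)).getD pr_q.1 [] = Fq := by
    rw [getD_entries hk hq Ψ₁, hFq]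
    apply List.filter_congr
    intro d _
    rw [hΨ₁]
    simp [if_neg (Ne.symm hne)]
  rw [hgq1]
  have hv2 : PySem.Set.diff Fq I = (PySem.Set.ofList pr_q.2).filter
      (fun d => Φ pr_q.1 d && !Φ pr_p.1 d) := by
    rw [PySem.Set.diff, hFq, List.filter_filter]
    apply List.filter_congr
    intro d _
    rw [hIcont d]
    cases hfp : Φ pr_p.1 d <;> cases hfq : Φ pr_q.1 d <;> simp
  set Ψ₂ : String → String → Bool :=
    fun r d => if r = pr_q.1 then Φ pr_q.1 d && !Φ pr_p.1 d else Ψ₁ r d with hΨ₂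
  have hIns2 : (PySem.Dict.mk (entriesOf par Ψ₁) :
      PySem.Dict String (PySem.Set String)).insert pr_q.1 (PySem.Set.diff Fq I)
      = PySem.Dict.mk (entriesOf par Ψ₂) := by
    apply insert_entries hk hq
    · intro pr _ hne' d
      rw [hΨ₂]
      simp [if_neg hne']
    · rw [hv2, hΨ₂]
      apply List.filter_congr
      intro d _
      simp
  rw [hIns2]
  congr 1
  apply entries_congr
  intro pr _ d
  rw [hΨ₂, hΨ₁]
  simp only [pairStep]
  by_cases h1 : pr.1 = pr_q.1
  · rw [h1]; simp [Ne.symm hne]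
  · by_cases h2 : pr.1 = pr_p.1
    · rw [h2]; simp [hne]
    · simp [h1, h2]

theorem foldA_entries {par : List (String × List String)} (hk : (par.map (fun pr => pr.1)).Nodup)
    (L : List (String × String))
    (hL : ∀ pq ∈ L, (∃ pr ∈ par, pr.1 = pq.1) ∧ (∃ pr ∈ par, pr.1 = pq.2) ∧ pq.1 ≠ pq.2)
    (Φ : String → String → Bool) (hG : GoodPhi par Φ) :
    L.foldl stepA (PySem.Dict.mk (entriesOf par Φ))
      = PySem.Dict.mk (entriesOf par (fun r d => runPairs (fun s => Φ s d) L r)) := by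
  induction L generalizing Φ with
  | nil => rfl
  | cons pq L ih =>
    obtain ⟨⟨pr_p, hp, hp1⟩, ⟨pr_q, hq, hq1⟩, hne⟩ := hL pq (by simp)
    have hstep : stepA (PySem.Dict.mk (entriesOf par Φ)) pq
        = PySem.Dict.mk (entriesOf par (fun r d => pairStep (fun s => Φ s d) pq r)) := by
      have := stepA_entries hk hp hq (by rw [hp1, hq1]; exact hne) Φ hG
      rw [hp1, hq1] at this
      simpa using this
    show List.foldl stepA (stepA (PySem.Dict.mk (entriesOf par Φ)) pq) L = _
    rw [hstep, ih (fun q hq => hL q (by simp [hq])) _ (good_pairStep hG pq)]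
    rfl

-- ========== A-side characterization ==========

def projsOf (par : List (String × List String)) (d : String) : List String :=
  (par.filter (fun pr => pr.2.contains d)).map (fun pr => pr.1)

def condPD (par : List (String × List String)) (p d : String) : Bool :=
  decide ((projsOf par d).length % 2 = 1) && decide ((projsOf par d).getLast? = some p)

def Phi0 (par : List (String × List String)) : String → String → Bool :=
  fun p d => (PySem.Set.ofList (vOf par p)).contains d

theorem pyCombos_ne {ks : List String} (hnd : ks.Nodup) {pq : String × String}
    (h : pq ∈ pyCombos ks) : pq.1 ≠ pq.2 := by
  induction ks with
  | nil => simp [pyCombos] at h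
  | cons x xs ih =>
    simp only [pyCombos, List.mem_append, List.mem_map] at h
    rcases h with ⟨y, hy, rfl⟩ | h
    · exact fun hc => (List.nodup_cons.mp hnd).1 (show x ∈ xs by
        have : x = y := hc
        rw [this]; exact hy)
    · exact ih (List.nodup_cons.mp hnd).2 h

theorem contains_ofList {xs : List String} {d : String} :
    (PySem.Set.ofList xs).contains d = xs.contains d := by
  simp only [PySem.Set.contains, List.contains_eq_mem, PySem.Set.mem_ofList]

theorem keys_entries (par : List (String × List String)) (Φ : String → String → Bool) :
    (PySem.Dict.mk (entriesOf par Φ) : PySem.Dict String (PySem.Set String)).keys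
      = par.map (fun pr => pr.1) := by
  simp [PySem.Dict.keys, entriesOf, List.map_map, Function.comp_def]

theorem good_Phi0 (par : List (String × List String)) : GoodPhi par (Phi0 par) :=
  fun _ _ h => h

theorem D0_entries {par : List (String × List String)}
    (hk : (par.map (fun pr => pr.1)).Nodup) :
    (PySem.Dict.ofList (par.map (fun pr => (pr.1, PySem.Set.ofList pr.2))) :
        PySem.Dict String (PySem.Set String))
      = PySem.Dict.mk (entriesOf par (Phi0 par)) := by
  apply PySem.Dict.ext
  have hfresh : ∀ a ∈ par.map (fun pr => (pr.1, PySem.Set.ofList pr.2)),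
      (PySem.Dict.empty : PySem.Dict String (PySem.Set String)).contains a.1 = false := by
    intro a _; rfl
  have hnd : ((par.map (fun pr => (pr.1, PySem.Set.ofList pr.2))).map (fun a => a.1)).Nodup := by
    rw [List.map_map]; exact hk
  have := PySem.Dict.items_foldl_insert_fresh
    (l := par.map (fun pr => (pr.1, PySem.Set.ofList pr.2)))
    (k := fun a => a.1) (v := fun a => a.2)
    (d := PySem.Dict.empty) hfresh hnd
  show (PySem.Dict.empty.update _).items = _
  rw [PySem.Dict.update]
  calc (List.foldl (fun acc p => acc.insert p.1 p.2) PySem.Dict.empty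
          (par.map (fun pr => (pr.1, PySem.Set.ofList pr.2)))).items
      = (PySem.Dict.empty : PySem.Dict String (PySem.Set String)).items
          ++ (par.map (fun pr => (pr.1, PySem.Set.ofList pr.2))).map (fun a => (a.1, a.2)) := this
    _ = (par.map (fun pr => (pr.1, PySem.Set.ofList pr.2))).map (fun a => (a.1, a.2)) := by
          simp [PySem.Dict.empty]
    _ = entriesOf par (Phi0 par) := by
          rw [List.map_map]
          apply List.map_congr_left
          intro pr hpr
          simp only [Function.comp_apply]
          congr 1
          rw [List.filter_eq_self.mpr]
          intro d hd
          simp only [Phi0, vOf_eq hk hpr, contains_ofList, List.contains_eq_mem]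
          have : d ∈ pr.2 := (PySem.Set.mem_ofList _ _).mp hd
          simp [this]

def D0 (par : List (String × List String)) : PySem.Dict String (PySem.Set String) :=
  PySem.Dict.ofList (par.map (fun pr => (pr.1, PySem.Set.ofList pr.2)))

def solve' (par : List (String × List String)) : String :=
  PySem.Str.join "\n"
    ((PySem.List.sorted
        ((((pyCombos (D0 par).keys).foldl stepA (D0 par)).keys).map
          (fun p => ((-1 : Int) * PySem.List.len
            (((pyCombos (D0 par).keys).foldl stepA (D0 par)).getD p []), p)))
        (fun r => toLex (r.1, r.2.toList))).foldl
      (fun s r => if r.1 ≠ 0 then s ++ [r.2 ++ " " ++ PySem.Int.toStr (-1 * r.1)] else s)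
      ([] : List String))

theorem solveA_eq (par : List (String × List String))
    (hk : (par.map (fun pr => pr.1)).Nodup) (hv : ∀ pr ∈ par, pr.2.Nodup) :
    solve par = PySem.Str.join "\n"
      (((PySem.List.sorted
          (par.map (fun pr =>
            ((-1 : Int) * ((pr.2.filter (fun d => condPD par pr.1 d)).length : Int), pr.1)))
          (fun r => toLex (r.1, r.2.toList))).filter
        (fun r => decide (r.1 ≠ 0))).map
      (fun r => r.2 ++ " " ++ PySem.Int.toStr (-1 * r.1))) := by
  have h0 : solve par = solve' par := rfl
  rw [h0]
  unfold solve' D0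
  rw [D0_entries hk, keys_entries]
  rw [foldA_entries hk _ (fun pq hpq => by
    obtain ⟨h1, h2⟩ := mem_pyCombos hpq
    obtain ⟨pr1, hpr1, he1⟩ := List.mem_map.mp h1
    obtain ⟨pr2, hpr2, he2⟩ := List.mem_map.mp h2
    exact ⟨⟨pr1, hpr1, he1⟩, ⟨pr2, hpr2, he2⟩, pyCombos_ne hk hpq⟩) (Phi0 par) (good_Phi0 par)]
  rw [keys_entries]
  have hrows : (par.map (fun pr => pr.1)).map
      (fun p => ((-1 : Int) * PySem.List.len
        ((PySem.Dict.mk (entriesOf par (fun r d =>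
            runPairs (fun s => Phi0 par s d) (pyCombos (par.map (fun pr => pr.1))) r))
          : PySem.Dict String (PySem.Set String)).getD p []), p))
      = par.map (fun pr =>
          ((-1 : Int) * ((pr.2.filter (fun d => condPD par pr.1 d)).length : Int), pr.1)) := by
    rw [List.map_map]
    apply List.map_congr_left
    intro pr hpr
    simp only [Function.comp_apply]
    rw [getD_entries hk hpr]
    congr 2
    rw [PySem.List.len_eq]
    congr 1
    rw [PySem.Set.ofList_eq_self_of_nodup _ (hv pr hpr)]
    congr 1
    apply List.filter_congr
    intro d _
    rw [runPairs_combos hk _ (List.mem_map_of_mem hpr)]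
    have hproj : (par.map (fun pr => pr.1)).filter (fun s => Phi0 par s d) = projsOf par d := by
      rw [List.filter_map]
      unfold projsOf
      congr 1
      apply List.filter_congr
      intro pr' hpr'
      simp only [Function.comp_apply, Phi0, vOf_eq hk hpr', contains_ofList]
    rw [hproj]
    rfl
  rw [hrows]
  have hbody : (fun (s : List String) (r : Int × String) =>
      if r.1 ≠ 0 then s ++ [r.2 ++ " " ++ PySem.Int.toStr (-1 * r.1)] else s)
      = (fun s r => if (fun (r : Int × String) => decide (r.1 ≠ 0)) r = true
          then s ++ [(fun (r : Int × String) => r.2 ++ " " ++ PySem.Int.toStr (-1 * r.1)) r] else s) := by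
    funext s r
    simp
  rw [hbody, PySem.List.foldl_append_if, List.nil_append]

-- ========== B-side characterization ==========

def allDevs (par : List (String × List String)) : List String := par.flatMap (fun pr => pr.2)

def allPairs (par : List (String × List String)) : List (String × String) :=
  par.flatMap (fun pr => pr.2.map (fun d => (d, pr.1)))

def Qlist (par : List (String × List String)) : List String :=
  ((PySem.Set.ofList (allDevs par)).filter
    (fun d => decide ((projsOf par d).length % 2 = 1))).map
    (fun d => (projsOf par d).getLastD "")

def rowsB (par : List (String × List String)) : List (Int × String) :=
  (PySem.Set.ofList (Qlist par)).map (fun p => (-((Qlist par).count p : Int), p))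

theorem cl_split (par : List (String × List String))
    (c0 : PySem.Dict String Int) (t0 : PySem.Dict String String) :
    par.foldl (fun cl pr => pr.2.foldl (fun cl2 d =>
        (cl2.1.insert d (cl2.1.getD d 0 + 1), cl2.2.insert d pr.1)) cl) (c0, t0)
      = (par.foldl (fun c pr => pr.2.foldl (fun c d => c.insert d (c.getD d 0 + 1)) c) c0,
         par.foldl (fun t pr => pr.2.foldl (fun t d => t.insert d pr.1) t) t0) := by
  induction par generalizing c0 t0 with
  | nil => rfl
  | cons pr par ih =>
    simp only [List.foldl_cons]
    rw [PySem.List.foldl_prod_mk (fun c d => c.insert d (c.getD d 0 + 1))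
      (fun t d => t.insert d pr.1) pr.2 c0 t0]
    exact ih _ _

theorem count_flatten (par : List (String × List String)) (c0 : PySem.Dict String Int) :
    par.foldl (fun c pr => pr.2.foldl (fun c d => c.insert d (c.getD d 0 + 1)) c) c0
      = (allDevs par).foldl (fun c d => c.insert d (c.getD d 0 + 1)) c0 := by
  induction par generalizing c0 with
  | nil => rfl
  | cons pr par ih =>
    simp only [List.foldl_cons, allDevs, List.flatMap_cons, List.foldl_append]
    exact ih _

theorem last_flatten (par : List (String × List String)) (t0 : PySem.Dict String String) :
    par.foldl (fun t pr => pr.2.foldl (fun t d => t.insert d pr.1) t) t0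
      = (allPairs par).foldl (fun t dp => t.insert dp.1 dp.2) t0 := by
  induction par generalizing t0 with
  | nil => rfl
  | cons pr par ih =>
    simp only [List.foldl_cons, allPairs, List.flatMap_cons, List.foldl_append, List.foldl_map]
    exact ih _

theorem getD_insert_fold (P : List (String × String)) (t0 : PySem.Dict String String)
    (k : String) (dflt : String) :
    (P.foldl (fun t dp => t.insert dp.1 dp.2) t0).getD k dflt
      = ((P.filter (fun dp => dp.1 == k)).map (fun dp => dp.2)).getLastD (t0.getD k dflt) := by
  induction P generalizing t0 with
  | nil => rfl
  | cons dp P ih =>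
    simp only [List.foldl_cons, List.filter_cons]
    by_cases hbe : (dp.1 == k) = true
    · have hk : dp.1 = k := by simpa using hbe
      rw [hbe, if_pos rfl]
      rw [ih]
      have : (t0.insert dp.1 dp.2).getD k dflt = dp.2 := by
        rw [← hk, PySem.Dict.getD, PySem.Dict.get?_insert_self]
        rfl
      rw [this, List.map_cons, List.getLastD_cons]
    · have hk : k ≠ dp.1 := by simp only [beq_iff_eq] at hbe; exact fun h => hbe h.symm
      simp only [hbe, Bool.false_eq_true, if_false]
      rw [ih]
      have : (t0.insert dp.1 dp.2).getD k dflt = t0.getD k dflt := by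
        rw [PySem.Dict.getD, PySem.Dict.get?_insert_of_ne _ _ hk]
        rfl
      rw [this]

theorem map_pair_filter {cs : List String} (hnd : cs.Nodup) (x d : String) :
    (cs.map (fun e => (e, x))).filter (fun dp => dp.1 == d)
      = if cs.contains d then [(d, x)] else [] := by
  induction cs with
  | nil => rfl
  | cons c cs ih =>
    simp only [List.map_cons, List.filter_cons]
    by_cases hc : (c == d) = true
    · have hcd : c = d := by simpa using hc
      subst hcd
      have hdn : c ∉ cs := (List.nodup_cons.mp hnd).1
      have hrest : (cs.map (fun e => (e, x))).filter (fun dp => dp.1 == c) = [] := by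
        rw [List.filter_eq_nil_iff]
        intro a ha
        obtain ⟨e, he, rfl⟩ := List.mem_map.mp ha
        simp only [beq_iff_eq]
        exact fun hcon => hdn (hcon ▸ he)
      simp [hrest, hdn]
    · have hcd : c ≠ d := by simpa using hc
      rw [ih (List.nodup_cons.mp hnd).2]
      simp [hc, Ne.symm hcd]

theorem allPairs_filter {par : List (String × List String)} (hv : ∀ pr ∈ par, pr.2.Nodup)
    (d : String) :
    (allPairs par).filter (fun dp => dp.1 == d)
      = (par.filter (fun pr => pr.2.contains d)).map (fun pr => (d, pr.1)) := by
  induction par with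
  | nil => rfl
  | cons pr par ih =>
    simp only [allPairs, List.flatMap_cons, List.filter_append, List.filter_cons]
    rw [map_pair_filter (hv pr (by simp)) pr.1 d]
    have ihr := ih (fun q hq => hv q (by simp [hq]))
    unfold allPairs at ihr
    rw [ihr]
    by_cases hc : pr.2.contains d = true
    · have hd : d ∈ pr.2 := by simpa [List.contains_eq_mem] using hc
      simp [hd]
    · have hd : d ∉ pr.2 := by simpa [List.contains_eq_mem] using hc
      simp [hd]

theorem lastOf_eq {par : List (String × List String)} (hv : ∀ pr ∈ par, pr.2.Nodup)
    (d : String) :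
    ((allPairs par).foldl (fun t dp => t.insert dp.1 dp.2) PySem.Dict.empty).getD d ""
      = (projsOf par d).getLastD "" := by
  rw [getD_insert_fold, allPairs_filter hv d]
  have h0 : (PySem.Dict.empty : PySem.Dict String String).getD d "" = "" := rfl
  rw [h0, List.map_map]
  rfl

theorem count_allDevs {par : List (String × List String)} (hv : ∀ pr ∈ par, pr.2.Nodup)
    (d : String) : (allDevs par).count d = (projsOf par d).length := by
  induction par with
  | nil => rfl
  | cons pr par ih =>
    have ihr := ih (fun q hq => hv q (by simp [hq]))
    simp only [allDevs, List.flatMap_cons, List.count_append, projsOf, List.filter_cons]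
    by_cases hc : pr.2.contains d = true
    · have hd : d ∈ pr.2 := by simpa [List.contains_eq_mem] using hc
      rw [List.count_eq_one_of_mem (hv pr (by simp)) hd]
      simp only [hc, if_pos, List.map_cons, List.length_cons]
      unfold allDevs projsOf at ihr
      omega
    · have hd : d ∉ pr.2 := by simpa [List.contains_eq_mem] using hc
      rw [List.count_eq_zero.mpr hd]
      simp only [hc, Bool.false_eq_true, if_false]
      unfold allDevs projsOf at ihr
      omega

theorem mem_projsOf {par : List (String × List String)} {d : String}
    (h : d ∈ allDevs par) : projsOf par d ≠ [] := by
  obtain ⟨pr, hpr, hd⟩ := List.mem_flatMap.mp h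
  intro hcon
  have : pr.1 ∈ projsOf par d := by
    unfold projsOf
    exact List.mem_map_of_mem (List.mem_filter.mpr ⟨hpr, by simpa [List.contains_eq_mem] using hd⟩)
  rw [hcon] at this
  simp at this

theorem getLast?_of_mem_allDevs {par : List (String × List String)} {d : String}
    (h : d ∈ allDevs par) :
    (projsOf par d).getLast? = some ((projsOf par d).getLastD "") := by
  have hne := mem_projsOf h
  rcases hl : projsOf par d with _ | ⟨a, l⟩
  · exact absurd hl hne
  · rw [List.getLastD_eq_getLast?]
    rcases hg : (a :: l).getLast? with _ | v
    · simp at hg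
    · rfl

theorem tally_conv (l : List (String × Int)) (last : PySem.Dict String String)
    (t0 : PySem.Dict String Int) :
    l.foldl (fun t dc => if PySem.Int.mod dc.2 2 == 1 then
        t.insert (last.getD dc.1 "") (t.getD (last.getD dc.1 "") 0 + 1) else t) t0
      = ((l.filter (fun dc => PySem.Int.mod dc.2 2 == 1)).map
          (fun dc => last.getD dc.1 "")).foldl
        (fun t q => t.insert q (t.getD q 0 + 1)) t0 := by
  induction l generalizing t0 with
  | nil => rfl
  | cons x l ih =>
    simp only [List.foldl_cons, List.filter_cons]
    by_cases hp : (PySem.Int.mod x.2 2 == 1) = true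
    · rw [hp, if_pos rfl, if_pos rfl, List.map_cons, List.foldl_cons, ih]
    · rw [if_neg hp, if_neg hp, ih]

theorem mod_two_beq (n : Nat) : (PySem.Int.mod (n : Int) 2 == 1) = decide (n % 2 = 1) := by
  have h2 : PySem.Int.mod (n : Int) 2 = ((n % 2 : Nat) : Int) := by
    exact_mod_cast PySem.Int.mod_natCast n 2
  rw [h2]
  have : n % 2 = 0 ∨ n % 2 = 1 := by omega
  rcases this with h | h <;> simp [h]

def clOf (par : List (String × List String)) :
    PySem.Dict String Int × PySem.Dict String String :=
  par.foldl (fun cl pr =>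
      pr.2.foldl (fun cl2 d =>
        (cl2.1.insert d (cl2.1.getD d 0 + 1), cl2.2.insert d pr.1)) cl)
    (PySem.Dict.empty, PySem.Dict.empty)

def solve_alt' (par : List (String × List String)) : String :=
  PySem.Str.join "\n"
    ((PySem.List.sorted
      (((clOf par).1.items.foldl (fun t dc =>
          if PySem.Int.mod dc.2 2 == 1 then
            t.insert ((clOf par).2.getD dc.1 "")
              (t.getD ((clOf par).2.getD dc.1 "") 0 + 1)
          else t) (PySem.Dict.empty : PySem.Dict String Int)).items.map
        (fun pc => (-pc.2, pc.1)))
      (fun r => toLex (r.1, r.2.toList))).map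
    (fun r => r.2 ++ " " ++ PySem.Int.toStr (-r.1)))

theorem solveB_eq (par : List (String × List String)) (hv : ∀ pr ∈ par, pr.2.Nodup) :
    solve_alt par = PySem.Str.join "\n"
      ((PySem.List.sorted (rowsB par) (fun r => toLex (r.1, r.2.toList))).map
        (fun r => r.2 ++ " " ++ PySem.Int.toStr (-r.1))) := by
  have h0 : solve_alt par = solve_alt' par := rfl
  rw [h0]
  unfold solve_alt' clOf
  rw [cl_split par PySem.Dict.empty PySem.Dict.empty]
  rw [count_flatten, last_flatten]
  dsimp only
  rw [PySem.Dict.foldl_insert_getD_add_one_eq_counter]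
  rw [tally_conv]
  rw [PySem.Dict.foldl_insert_getD_add_one_eq_counter]
  have hQ : (((PySem.Dict.counter (allDevs par)).items.filter
        (fun dc => PySem.Int.mod dc.2 2 == 1)).map
      (fun dc => ((allPairs par).foldl (fun t dp => t.insert dp.1 dp.2)
        PySem.Dict.empty).getD dc.1 ""))
      = Qlist par := by
    rw [PySem.Dict.items_counter, List.filter_map, List.map_map]
    unfold Qlist
    have hfil : (PySem.Set.ofList (allDevs par)).filter
        ((fun (dc : String × Int) => PySem.Int.mod dc.2 2 == 1)
          ∘ (fun k => (k, (List.count k (allDevs par) : Int))))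
        = (PySem.Set.ofList (allDevs par)).filter
          (fun d => decide ((projsOf par d).length % 2 = 1)) := by
      apply List.filter_congr
      intro d _
      simp only [Function.comp_apply]
      rw [count_allDevs hv d, mod_two_beq]
    rw [hfil]
    apply List.map_congr_left
    intro d _
    simp only [Function.comp_apply]
    exact lastOf_eq hv d
  rw [hQ, PySem.Dict.items_counter, List.map_map]
  rfl

-- ========== bridging A and B ==========

def rowsA (par : List (String × List String)) : List (Int × String) :=
  par.map (fun pr =>
    (-((pr.2.filter (fun d => condPD par pr.1 d)).length : Int), pr.1))

theorem countP_eq_of_nodup {l1 l2 : List String} (h1 : l1.Nodup) (h2 : l2.Nodup)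
    {p1 p2 : String → Bool} (h : ∀ d, (d ∈ l1 ∧ p1 d = true) ↔ (d ∈ l2 ∧ p2 d = true)) :
    l1.countP p1 = l2.countP p2 := by
  rw [List.countP_eq_length_filter, List.countP_eq_length_filter]
  apply List.Perm.length_eq
  rw [List.perm_ext_iff_of_nodup (h1.filter _) (h2.filter _)]
  intro a
  simp only [List.mem_filter]
  exact h a

theorem getLastD_eq_of_mem_allDevs {par : List (String × List String)} {d p : String}
    (h : d ∈ allDevs par) :
    ((projsOf par d).getLastD "" = p) ↔ ((projsOf par d).getLast? = some p) := by
  rw [getLast?_of_mem_allDevs h]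
  constructor
  · intro he; rw [he]
  · intro he; exact (Option.some_injective _ he).symm ▸ rfl

theorem mem_pr_of_getLast? {par : List (String × List String)}
    (hk : (par.map (fun pr => pr.1)).Nodup) {pr : String × List String} (hpr : pr ∈ par)
    {d : String} (h : pr.1 ∈ projsOf par d) : d ∈ pr.2 := by
  unfold projsOf at h
  obtain ⟨pr', hpr', he⟩ := List.mem_map.mp h
  have hpr'2 := List.mem_filter.mp hpr'
  have : pr' = pr := keyInj hk hpr'2.1 hpr he
  rw [← this]
  simpa [List.contains_eq_mem] using hpr'2.2

theorem Qcount {par : List (String × List String)}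
    (hk : (par.map (fun pr => pr.1)).Nodup) (hv : ∀ pr ∈ par, pr.2.Nodup)
    {pr : String × List String} (hpr : pr ∈ par) :
    (Qlist par).count pr.1 = (pr.2.filter (fun d => condPD par pr.1 d)).length := by
  rw [List.count_eq_countP]
  unfold Qlist
  rw [List.countP_map, List.countP_filter, ← List.countP_eq_length_filter]
  apply countP_eq_of_nodup (PySem.Set.nodup_ofList _) (hv pr hpr)
  intro d
  simp only [Function.comp_apply, Bool.and_eq_true, beq_iff_eq, decide_eq_true_eq,
    PySem.Set.mem_ofList, condPD]
  constructor
  · rintro ⟨hdS, hlast, hodd⟩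
    have hsome : (projsOf par d).getLast? = some pr.1 :=
      (getLastD_eq_of_mem_allDevs hdS).mp hlast
    refine ⟨mem_pr_of_getLast? hk hpr (List.mem_of_getLast? hsome), hodd, hsome⟩
  · rintro ⟨hd2, hodd, hsome⟩
    have hdS : d ∈ allDevs par := List.mem_flatMap.mpr ⟨pr, hpr, hd2⟩
    exact ⟨hdS, (getLastD_eq_of_mem_allDevs hdS).mpr hsome, hodd⟩

theorem mem_rows {par : List (String × List String)}
    (hk : (par.map (fun pr => pr.1)).Nodup) (hv : ∀ pr ∈ par, pr.2.Nodup)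
    (x : Int × String) :
    x ∈ (rowsA par).filter (fun r => decide (r.1 ≠ 0)) ↔ x ∈ rowsB par := by
  simp only [List.mem_filter, rowsA, rowsB, List.mem_map, decide_eq_true_eq]
  constructor
  · rintro ⟨⟨pr, hpr, rfl⟩, hne⟩
    simp only [ne_eq, neg_eq_zero, Nat.cast_eq_zero] at hne
    have hlen : (pr.2.filter (fun d => condPD par pr.1 d)).length ≠ 0 := fun h => hne (by simp [h])
    have hex : ∃ d, d ∈ pr.2.filter (fun d => condPD par pr.1 d) := by
      rcases hfe : pr.2.filter (fun d => condPD par pr.1 d) with _ | ⟨a, l⟩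
      · rw [hfe] at hlen; simp at hlen
      · exact ⟨a, by simp⟩
    obtain ⟨d, hd⟩ := hex
    have hd2 := List.mem_filter.mp hd
    have hcond := hd2.2
    simp only [condPD, Bool.and_eq_true, decide_eq_true_eq] at hcond
    have hdS : d ∈ allDevs par := List.mem_flatMap.mpr ⟨pr, hpr, hd2.1⟩
    have hQmem : pr.1 ∈ Qlist par := by
      unfold Qlist
      apply List.mem_map.mpr
      refine ⟨d, List.mem_filter.mpr ⟨(PySem.Set.mem_ofList _ _).mpr hdS, by
        simp [hcond.1]⟩, ?_⟩
      exact (getLastD_eq_of_mem_allDevs hdS).mpr hcond.2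
    refine ⟨pr.1, (PySem.Set.mem_ofList _ _).mpr hQmem, ?_⟩
    rw [Qcount hk hv hpr]
  · rintro ⟨p, hp, rfl⟩
    have hpQ : p ∈ Qlist par := (PySem.Set.mem_ofList _ _).mp hp
    unfold Qlist at hpQ
    obtain ⟨d, hdf, he⟩ := List.mem_map.mp hpQ
    have hdf2 := List.mem_filter.mp hdf
    have hdS : d ∈ allDevs par := (PySem.Set.mem_ofList _ _).mp hdf2.1
    have hodd : ((projsOf par d).length % 2 = 1) := by simpa using hdf2.2
    have hsome : (projsOf par d).getLast? = some p := (getLastD_eq_of_mem_allDevs hdS).mp he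
    have hpmem : p ∈ projsOf par d := List.mem_of_getLast? hsome
    obtain ⟨pr, hprf, hpr1⟩ := List.mem_map.mp hpmem
    have hprm := (List.mem_filter.mp hprf).1
    have hd2 : d ∈ pr.2 := mem_pr_of_getLast? hk hprm (hpr1 ▸ hpmem)
    have hcond : condPD par pr.1 d = true := by
      simp only [condPD, Bool.and_eq_true, decide_eq_true_eq]
      exact ⟨hodd, hpr1 ▸ hsome⟩
    have hdmem : d ∈ pr.2.filter (fun d => condPD par pr.1 d) :=
      List.mem_filter.mpr ⟨hd2, hcond⟩
    have hlen : (pr.2.filter (fun d => condPD par pr.1 d)).length ≠ 0 := by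
      intro hcon
      rw [List.length_eq_zero_iff] at hcon
      rw [hcon] at hdmem
      simp at hdmem
    constructor
    · exact ⟨pr, hprm, by rw [← hpr1, Qcount hk hv hprm]⟩
    · rw [← hpr1, Qcount hk hv hprm]
      simp [hlen]

theorem rowsA_nodup {par : List (String × List String)}
    (hk : (par.map (fun pr => pr.1)).Nodup) : (rowsA par).Nodup := by
  apply List.Nodup.of_map (f := fun r => r.2)
  rw [rowsA, List.map_map]
  exact hk

theorem rowsB_nodup (par : List (String × List String)) : (rowsB par).Nodup := by
  apply List.Nodup.of_map (f := fun r => r.2)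
  rw [rowsB, List.map_map]
  have : ((fun (r : Int × String) => r.2) ∘ fun p => (-((Qlist par).count p : Int), p))
      = fun p => p := rfl
  rw [this, List.map_id']
  exact PySem.Set.nodup_ofList _

theorem key_injective {a b : Int × String}
    (h : toLex (a.1, a.2.toList) = toLex (b.1, b.2.toList)) : a = b := by
  have h' : (a.1, a.2.toList) = (b.1, b.2.toList) := by
    simpa using h
  have h1 : a.1 = b.1 := (Prod.ext_iff.mp h').1
  have h2 : a.2.toList = b.2.toList := (Prod.ext_iff.mp h').2
  exact Prod.ext h1 (String.ext h2)

theorem rows_bridge {par : List (String × List String)}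
    (hk : (par.map (fun pr => pr.1)).Nodup) (hv : ∀ pr ∈ par, pr.2.Nodup) :
    (PySem.List.sorted (rowsA par) (fun r => toLex (r.1, r.2.toList))).filter
        (fun r => decide (r.1 ≠ 0))
      = PySem.List.sorted (rowsB par) (fun r => toLex (r.1, r.2.toList)) := by
  have hsp := PySem.List.sorted_perm (rowsA par) (fun r => toLex (r.1, r.2.toList)) false
  have hndS : (PySem.List.sorted (rowsA par) (fun r => toLex (r.1, r.2.toList))).Nodup :=
    (hsp.nodup_iff).mpr (rowsA_nodup hk)
  have hpw := PySem.List.sorted_pairwise (rowsA par) (fun r => toLex (r.1, r.2.toList))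
  have hpw2 : ((PySem.List.sorted (rowsA par) (fun r => toLex (r.1, r.2.toList))).filter
      (fun r => decide (r.1 ≠ 0))).Pairwise
      (fun a b => (fun r => toLex (r.1, r.2.toList)) a < (fun r => toLex (r.1, r.2.toList)) b) := by
    have hand := hpw.and hndS
    have := hand.filter (fun r => decide (r.1 ≠ 0))
    apply this.imp
    intro a b hab
    exact lt_of_le_of_ne hab.1 (fun he => hab.2 (key_injective he))
  have hperm : ((PySem.List.sorted (rowsA par) (fun r => toLex (r.1, r.2.toList))).filter
      (fun r => decide (r.1 ≠ 0))).Perm (rowsB par) := by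
    rw [List.perm_ext_iff_of_nodup (hndS.filter _) (rowsB_nodup par)]
    intro x
    constructor
    · intro hx
      apply (mem_rows hk hv x).mp
      rw [List.mem_filter] at hx ⊢
      exact ⟨(PySem.List.mem_sorted _ _ _ _).mp hx.1, hx.2⟩
    · intro hx
      have := (mem_rows hk hv x).mpr hx
      rw [List.mem_filter] at this ⊢
      exact ⟨(PySem.List.mem_sorted _ _ _ _).mpr this.1, this.2⟩
  exact (PySem.List.sorted_eq_of_perm_of_pairwise_lt (rowsB par) _ _ hperm hpw2).symm

theorem AB_equal (par : List (String × List String))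
    (hk : (par.map (fun pr => pr.1)).Nodup) (hv : ∀ pr ∈ par, pr.2.Nodup) :
    solve par = solve_alt par := by
  rw [solveA_eq par hk hv, solveB_eq par hv]
  have hrows : par.map (fun pr =>
      ((-1 : Int) * ((pr.2.filter (fun d => condPD par pr.1 d)).length : Int), pr.1))
      = rowsA par := by
    apply List.map_congr_left
    intro pr _
    rw [neg_one_mul]
  rw [hrows]
  have hfmt : (fun (r : Int × String) => r.2 ++ " " ++ PySem.Int.toStr (-1 * r.1))
      = (fun r => r.2 ++ " " ++ PySem.Int.toStr (-r.1)) := by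
    funext r
    rw [neg_one_mul]
  rw [hfmt, rows_bridge hk hv]

-- ===== VERDICT (by name: the statement is the Claim_ definition above) =====
theorem solve_spec : Claim_equal_solve := by
  intro par _ hpre
  unfold Spec_solve
  exact AB_equal par hpre.1 hpre.2
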